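-- pv_equiv track=rewrite | github.com/ai-computing/aicomp | fasop/partition.py | get_nodes_per_stage_simple
-- ===== SOURCE A (Python) =====
-- from typing import List, Dict, Optional, Tuple, Union
--
-- def get_nodes_per_stage_simple(
--     total_nodes: int,
--     num_stages: int,
-- ) -> List[Tuple[int, int]]:
--     """
--     Simple split: distribute nodes evenly across stages.
--
--     This simulates IR.py's simple_split logic which divides
--     call_module nodes evenly by count.
--
--     Args:
--         total_nodes: Total number of nodes
--         num_stages: Number of pipeline stages (PP degree)
--
--     Returns:
--         List of (start_node_idx, end_node_idx) tuples for each stage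
--
--     Example:
--         >>> get_nodes_per_stage_simple(641, 8)
--         [(0, 79), (80, 159), (160, 239), (240, 319), (320, 399), (400, 479), (480, 559), (560, 640)]
--     """
--     if num_stages > total_nodes:
--         raise ValueError(f"num_stages ({num_stages}) > total_nodes ({total_nodes})")
--
--     nodes_per_stage = total_nodes // num_stages
--     remainder = total_nodes % num_stages
--
--     stage_ranges = []
--     current_node = 0
--
--     for stage_id in range(num_stages):
--         # Distribute remainder to first stages
--         stage_size = nodes_per_stage + (1 if stage_id < remainder else 0)
--         start_idx = current_node
--         end_idx = current_node + stage_size - 1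
--         stage_ranges.append((start_idx, end_idx))
--         current_node += stage_size
--
--     return stage_ranges
-- ===== SOURCE B (Python) =====
-- def get_nodes_per_stage_simple(total_nodes, num_stages):
--     if num_stages > total_nodes:
--         raise ValueError(f"num_stages ({num_stages}) > total_nodes ({total_nodes})")
--     q = total_nodes // num_stages
--     r = total_nodes % num_stages
--     return [(i * q + min(i, r), (i + 1) * q + min(i + 1, r) - 1)
--             for i in range(num_stages)]
-- ===== Notes on version B (the rewrite author's own statement) =====
-- stated objective: simpler
-- what changed: Replaces the running current_node accumulator loop with a single comprehension whose boundaries are closed-form offsets i*q + min(i, r).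
import Mathlib
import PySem

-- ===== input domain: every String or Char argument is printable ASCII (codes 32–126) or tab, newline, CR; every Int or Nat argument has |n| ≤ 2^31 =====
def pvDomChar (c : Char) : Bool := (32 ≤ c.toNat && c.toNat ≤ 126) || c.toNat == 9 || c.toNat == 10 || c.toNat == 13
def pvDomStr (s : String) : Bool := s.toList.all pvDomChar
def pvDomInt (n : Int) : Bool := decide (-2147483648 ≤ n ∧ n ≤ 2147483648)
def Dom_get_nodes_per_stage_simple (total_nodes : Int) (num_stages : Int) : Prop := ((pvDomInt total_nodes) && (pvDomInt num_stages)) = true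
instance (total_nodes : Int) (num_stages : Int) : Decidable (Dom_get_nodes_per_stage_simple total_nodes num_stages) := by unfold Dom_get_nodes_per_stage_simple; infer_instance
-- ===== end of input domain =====

-- B replaces A's running current_node accumulator loop by a comprehension with
-- closed-form stage boundaries (objective: simpler).

-- ===== PORT A =====
-- A raises ValueError when num_stages > total_nodes and ZeroDivisionError when
-- num_stages == 0 (and total_nodes ≥ 0); those inputs are excluded by Pre_ below.
def get_nodes_per_stage_simple (total_nodes : Int) (num_stages : Int) : List (Int × Int) :=
  if num_stages > total_nodes then []   -- raise ValueError (excluded by Pre_)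
  else
    let nodes_per_stage := PySem.Int.floordiv total_nodes num_stages
    let remainder := PySem.Int.mod total_nodes num_stages
    let st := (PySem.List.pyRange 0 num_stages 1).foldl
      (fun (st : List (Int × Int) × Int) stage_id =>
        let stage_size := nodes_per_stage + (if stage_id < remainder then 1 else 0)
        let start_idx := st.2
        let end_idx := st.2 + stage_size - 1
        (st.1 ++ [(start_idx, end_idx)], st.2 + stage_size))
      ([], 0)
    st.1

-- ===== PORT B =====
def get_nodes_per_stage_simple_alt (total_nodes : Int) (num_stages : Int) : List (Int × Int) :=
  if num_stages > total_nodes then []   -- raise ValueError (excluded by Pre_)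
  else
    let q := PySem.Int.floordiv total_nodes num_stages
    let r := PySem.Int.mod total_nodes num_stages
    (PySem.List.pyRange 0 num_stages 1).map
      (fun i => (i * q + min i r, (i + 1) * q + min (i + 1) r - 1))

-- ===== PRECONDITION & SPEC =====
-- Pre_ excludes exactly the inputs where A raises: ValueError when
-- num_stages > total_nodes, ZeroDivisionError when num_stages == 0.
def Pre_get_nodes_per_stage_simple (total_nodes : Int) (num_stages : Int) : Prop :=
  num_stages ≤ total_nodes ∧ num_stages ≠ 0
instance (total_nodes : Int) (num_stages : Int) : Decidable (Pre_get_nodes_per_stage_simple total_nodes num_stages) := by unfold Pre_get_nodes_per_stage_simple; infer_instance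
def pvWitness_get_nodes_per_stage_simple : Int × Int := (641, 8)

def Spec_get_nodes_per_stage_simple (total_nodes : Int) (num_stages : Int) (out : List (Int × Int)) : Prop := out = get_nodes_per_stage_simple_alt total_nodes num_stages
instance (total_nodes : Int) (num_stages : Int) (out : List (Int × Int)) : Decidable (Spec_get_nodes_per_stage_simple total_nodes num_stages out) := by unfold Spec_get_nodes_per_stage_simple; infer_instance

-- ===== CLAIM (what is proved, stated in full; the proofs are below) =====
def Claim_equal_get_nodes_per_stage_simple : Prop := ∀ (total_nodes : Int) (num_stages : Int), Dom_get_nodes_per_stage_simple total_nodes num_stages → Pre_get_nodes_per_stage_simple total_nodes num_stages → Spec_get_nodes_per_stage_simple total_nodes num_stages (get_nodes_per_stage_simple total_nodes num_stages)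

-- ===== LEMMAS AND PROOFS =====

-- Invariant of A's loop: after the first k stages the accumulator equals the
-- closed-form prefix (map of g over range k, offset k*q + min k r).
theorem pv_fold_closed (q r : Int) (hr : 0 ≤ r) (k : Nat) :
    (PySem.List.pyRange 0 (k : Int) 1).foldl
      (fun (st : List (Int × Int) × Int) stage_id =>
        (st.1 ++ [(st.2, st.2 + (q + (if stage_id < r then 1 else 0)) - 1)],
         st.2 + (q + (if stage_id < r then 1 else 0))))
      ([], 0)
    = ((PySem.List.pyRange 0 (k : Int) 1).map
        (fun i => (i * q + min i r, (i + 1) * q + min (i + 1) r - 1)),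
       (k : Int) * q + min (k : Int) r) := by
  induction k with
  | zero => simp [PySem.List.pyRange_one_eq_nil (le_refl (0:Int)), min_eq_left hr]
  | succ k ih =>
    have hsplit : PySem.List.pyRange 0 ((k : Int) + 1) 1
        = PySem.List.pyRange 0 (k : Int) 1 ++ [(k : Int)] :=
      PySem.List.pyRange_one_succ_right (by positivity)
    push_cast
    rw [hsplit, List.foldl_append, ih, List.map_append]
    simp only [List.foldl_cons, List.foldl_nil, List.map_cons, List.map_nil]
    have hmin : min ((k : Int) + 1) r = min (k : Int) r + (if (k : Int) < r then 1 else 0) := by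
      split_ifs with h <;> omega
    rw [Prod.mk.injEq]
    constructor
    · simp only [List.append_cancel_left_eq, List.cons.injEq, and_true, Prod.mk.injEq, true_and]
      rw [hmin]; ring
    · rw [hmin]; ring

theorem pv_mod_nonneg (t n : Int) (hn : 0 < n) : 0 ≤ PySem.Int.mod t n := by
  rw [PySem.Int.mod_eq_emod_of_pos hn]
  exact Int.emod_nonneg t (by omega)

-- ===== VERDICT =====
theorem get_nodes_per_stage_simple_spec : Claim_equal_get_nodes_per_stage_simple := by
  intro t n _ hpre
  unfold Spec_get_nodes_per_stage_simple get_nodes_per_stage_simple get_nodes_per_stage_simple_alt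
  split_ifs with h
  · rfl
  · by_cases hn : n ≤ 0
    · simp [PySem.List.pyRange_one_eq_nil hn]
    · have hpos : 0 < n := by omega
      have hk : n = ((n.toNat : Int)) := by omega
      rw [hk]
      dsimp only
      rw [pv_fold_closed (PySem.Int.floordiv t ((n.toNat : Int))) (PySem.Int.mod t ((n.toNat : Int)))
            (pv_mod_nonneg t ((n.toNat : Int)) (by omega)) n.toNat]
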